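-- pv_equiv track=rewrite | github.com/woodworthkyle/kwoodworth.dev | pages/views.py | _breadcrumbs_for_dir
-- ===== SOURCE A (Python) =====
-- def _breadcrumbs_for_dir(req_path: str):
--     parts = [p for p in req_path.split("/") if p]
--     crumbs = [("Home", "/")]
--     acc = ""
--     for part in parts:
--         acc += part + "/"
--         crumbs.append((part.replace("-", " ").replace("_", " ").title(), "/" + acc))
--     return crumbs
-- ===== SOURCE B (Python) =====
-- def _breadcrumbs_for_dir(req_path: str):
--     parts = [p for p in req_path.split("/") if p]
--     return [("Home", "/")] + [
--         (p.replace("-", " ").replace("_", " ").title(),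
--          "/" + "/".join(parts[:i + 1]) + "/")
--         for i, p in enumerate(parts)
--     ]
-- ===== Notes on version B (the rewrite author's own statement) =====
-- stated objective: alternative
-- what changed: Replaces the stateful loop that threads a running 'acc' string and mutates a crumbs list with a single stateless list comprehension over enumerate(parts) that recomputes each URL directly as '/' + '/'.join(parts[:i+1]) + '/'.
import Mathlib
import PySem

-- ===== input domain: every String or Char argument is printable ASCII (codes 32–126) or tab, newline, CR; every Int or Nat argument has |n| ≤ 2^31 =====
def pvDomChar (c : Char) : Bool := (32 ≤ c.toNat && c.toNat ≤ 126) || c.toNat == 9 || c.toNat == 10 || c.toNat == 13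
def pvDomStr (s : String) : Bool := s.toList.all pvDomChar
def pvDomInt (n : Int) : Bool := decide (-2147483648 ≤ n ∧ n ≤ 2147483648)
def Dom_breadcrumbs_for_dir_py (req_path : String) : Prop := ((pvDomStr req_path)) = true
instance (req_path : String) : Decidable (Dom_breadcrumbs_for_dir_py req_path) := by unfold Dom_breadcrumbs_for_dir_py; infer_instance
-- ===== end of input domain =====

-- B replaces A's stateful accumulator loop with a stateless comprehension over
-- enumerate(parts) that recomputes each URL from a slice-join; same results, alternative decomposition.


-- ===== PORT A =====
-- str.title(), hand-ported (no PySem primitive): exact on the ASCII domain, where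
-- the cased characters are exactly the ASCII letters.
def pvTitleGo : Bool → List Char → List Char
  | _, [] => []
  | prevCased, c :: cs =>
    (if c.isAlpha then (if prevCased then c.toLower else c.toUpper) else c)
      :: pvTitleGo c.isAlpha cs

def pvTitle (s : String) : String := String.ofList (pvTitleGo false s.toList)

-- parts = [p for p in req_path.split("/") if p]   (identical first line of A and of B)
def pvParts (req_path : String) : List String :=
  ((PySem.Str.split? req_path "/").getD []).filter (fun p => p ≠ "")

-- part.replace("-", " ").replace("_", " ").title()   (identical in A and in B)
def pvLabel (p : String) : String :=
  pvTitle (PySem.Str.replace (PySem.Str.replace p "-" " ") "_" " ")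

def breadcrumbs_for_dir_py (req_path : String) : List (String × String) :=
  ((pvParts req_path).foldl
    (fun st part =>
      let acc := st.2 ++ (part ++ "/")
      (st.1 ++ [(pvLabel part, "/" ++ acc)], acc))
    ([("Home", "/")], "")).1

-- ===== PORT B =====
def breadcrumbs_for_dir_py_alt (req_path : String) : List (String × String) :=
  let parts := pvParts req_path
  ("Home", "/") ::
    (PySem.List.enumerate parts).map (fun ip =>
      (pvLabel ip.2,
       "/" ++ PySem.Str.join "/" (PySem.List.slice parts none (some (ip.1 + 1))) ++ "/"))

-- ===== PRECONDITION & SPEC =====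
def Spec_breadcrumbs_for_dir_py (req_path : String) (out : List (String × String)) : Prop := out = breadcrumbs_for_dir_py_alt req_path
instance (req_path : String) (out : List (String × String)) : Decidable (Spec_breadcrumbs_for_dir_py req_path out) := by unfold Spec_breadcrumbs_for_dir_py; infer_instance

-- ===== CLAIM (what is proved, stated in full; the proofs are below) =====
def Claim_equal_breadcrumbs_for_dir_py : Prop := ∀ (req_path : String), Dom_breadcrumbs_for_dir_py req_path → Spec_breadcrumbs_for_dir_py req_path (breadcrumbs_for_dir_py req_path)

-- ===== LEMMAS AND PROOFS =====

-- the sequence of crumbs A's loop emits, as a function of the running prefix `acc`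
def pvEmit (acc : String) : List String → List (String × String)
  | [] => []
  | p :: ps => (pvLabel p, "/" ++ (acc ++ (p ++ "/"))) :: pvEmit (acc ++ (p ++ "/")) ps

lemma pvFoldA (ps : List String) : ∀ (crumbs : List (String × String)) (acc : String),
    (ps.foldl
      (fun st part =>
        let a := st.2 ++ (part ++ "/")
        (st.1 ++ [(pvLabel part, "/" ++ a)], a))
      (crumbs, acc)).1 = crumbs ++ pvEmit acc ps := by
  induction ps with
  | nil => intro crumbs acc; simp [pvEmit]
  | cons p ps ih => intro crumbs acc; simp [List.foldl, pvEmit, ih]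

lemma pvCharsJoinS (ds : List (List Char)) (p : List Char) :
    PySem.Chars.join ['/'] (ds ++ [p]) ++ ['/']
      = ds.flatMap (fun q => q ++ ['/']) ++ (p ++ ['/']) := by
  induction ds with
  | nil => simp [PySem.Chars.join_singleton]
  | cons d ds ih =>
    cases ds with
    | nil => simp [PySem.Chars.join_cons_cons, PySem.Chars.join_singleton]
    | cons e ds' =>
      simp only [List.cons_append, PySem.Chars.join_cons_cons] at ih ⊢
      simp [ih]

lemma pvToListFlat (done : List String) : ∀ (a : String),
    (done.foldl (fun a q => a ++ (q ++ "/")) a).toList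
      = (done.map String.toList).foldl (fun a q => a ++ (q ++ ['/'])) a.toList := by
  induction done with
  | nil => intro a; rfl
  | cons d done ih =>
    intro a
    simp only [List.foldl, List.map, ih, String.toList_append]
    congr 1

lemma pvCharsFlatL (ds : List (List Char)) : ∀ (a : List Char),
    ds.foldl (fun a q => a ++ (q ++ ['/'])) a = a ++ ds.flatMap (fun q => q ++ ['/']) := by
  induction ds with
  | nil => simp
  | cons d ds ih => intro a; simp [List.foldl, ih]

lemma pvJoinS (done : List String) (p : String) :
    PySem.Str.join "/" (done ++ [p]) ++ "/"
      = done.foldl (fun a q => a ++ (q ++ "/")) "" ++ (p ++ "/") := by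
  apply String.ext
  simp only [String.toList_append, PySem.Str.toList_join, List.map_append, List.map_cons,
    List.map_nil, pvToListFlat]
  have h1 : ("/" : String).toList = ['/'] := rfl
  have h2 : ("" : String).toList = [] := rfl
  rw [h1, h2, pvCharsFlatL, List.nil_append]
  exact pvCharsJoinS (done.map String.toList) p.toList

lemma pvStrAssoc (a b c : String) : a ++ b ++ c = a ++ (b ++ c) :=
  String.ext (by simp [String.toList_append])

lemma pvMapB (parts : List String) : ∀ (rest done : List String), done ++ rest = parts →
    (PySem.List.enumerate rest (done.length : Int)).map
        (fun ip => (pvLabel ip.2,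
          "/" ++ PySem.Str.join "/" (PySem.List.slice parts none (some (ip.1 + 1))) ++ "/"))
      = pvEmit (done.foldl (fun a q => a ++ (q ++ "/")) "") rest := by
  intro rest
  induction rest with
  | nil => intro done h; simp [PySem.List.enumerate, pvEmit]
  | cons p ps ih =>
    intro done h
    rw [PySem.List.enumerate_cons, List.map_cons]
    have hcast : ((done.length : Int) + 1) = ((done.length + 1 : Nat) : Int) := by push_cast; ring
    have hslice : PySem.List.slice parts none (some ((done.length : Int) + 1))
        = done ++ [p] := by
      rw [hcast, PySem.List.slice_to_natCast, ← h]
      rw [List.take_append]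
      simp
    have hdone : (done ++ [p]) ++ ps = parts := by simp [← h]
    have ihx := ih (done ++ [p]) hdone
    simp only [List.length_append, List.length_cons, List.length_nil, Nat.zero_add,
      Nat.cast_add, Nat.cast_one] at ihx
    simp only [pvEmit, hslice]
    rw [pvStrAssoc, pvJoinS, ihx, List.foldl_append]
    simp [List.foldl]

-- ===== VERDICT (by name: the statement is the Claim_ definition above) =====
theorem breadcrumbs_for_dir_py_spec : Claim_equal_breadcrumbs_for_dir_py := by
  intro req_path _
  unfold Spec_breadcrumbs_for_dir_py breadcrumbs_for_dir_py breadcrumbs_for_dir_py_alt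
  dsimp only
  rw [pvFoldA]
  have h := pvMapB (pvParts req_path) (pvParts req_path) [] rfl
  simp only [List.length_nil, Nat.cast_zero, List.foldl_nil] at h
  rw [h]
  rfl
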